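-- pv_equiv track=rewrite | github.com/kostergroup/SIMsalabim-The-Shell | utils/general.py | construct_cmd
-- ===== SOURCE A (Python) =====
-- def construct_cmd(type, cmd_pars):
--     """Construct a single string to use as command to run a SIMsalabim executable
--
--     Parameters
--     ----------
--     type : string
--         Which program to run: simss or zimt
--     cmd_pars : List
--         List with parameters to add to the simss/zimt cmd line. Each parameter is a dict with par,val keys.
--         Note: when relevant the first entry must be the deviceparameters file with a key: dev_par_file
--
--     Returns
--     -------
--     string
--         Constructed string to run as cmd
--     """
--     # Start with the executable name
--     cmd_line = './' + type
--
--     # Check whether a device parameters file has been defined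
--     for i in cmd_pars:
--         # When specified, the device parameter file must be placed first, as is required by SIMsalabim
--         if i['par'] == 'dev_par_file':
--             args_single = ' ' + i['val']
--             cmd_line = cmd_line + args_single
--             # After the dev_par_file key had been found once, stop the loop. If more than one dev_par_file is specified, the rest are ignored.
--             break
--
--     # Add the parameters
--     for i in cmd_pars:
--         if i['par'] != 'dev_par_file':
--             # Add each parameter as " -par_name par_value"
--             args_single = ' -' +i['par'] + ' ' + i['val']
--             cmd_line = cmd_line + args_single
--
--     return cmd_line
-- ===== SOURCE B (Python) =====
-- def construct_cmd(type, cmd_pars):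
--     """Single pass over cmd_pars accumulating the dev-file prefix and the
--     flag suffix simultaneously (instead of A's two sequential scans)."""
--     dev = ''
--     dev_found = False
--     rest = ''
--     for i in cmd_pars:
--         if i['par'] == 'dev_par_file':
--             if not dev_found:
--                 dev = ' ' + i['val']
--                 dev_found = True
--         else:
--             rest = rest + ' -' + i['par'] + ' ' + i['val']
--     return './' + type + dev + rest
-- ===== Notes on version B (the rewrite author's own statement) =====
-- stated objective: alternative
-- what changed: Replaces A's two sequential scans (one break-on-first-dev_par_file scan, then a full scan for the other flags) with a single fold that accumulates the dev-file prefix and the flag suffix simultaneously in a (dev, dev_found, rest) state.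
import Mathlib
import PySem

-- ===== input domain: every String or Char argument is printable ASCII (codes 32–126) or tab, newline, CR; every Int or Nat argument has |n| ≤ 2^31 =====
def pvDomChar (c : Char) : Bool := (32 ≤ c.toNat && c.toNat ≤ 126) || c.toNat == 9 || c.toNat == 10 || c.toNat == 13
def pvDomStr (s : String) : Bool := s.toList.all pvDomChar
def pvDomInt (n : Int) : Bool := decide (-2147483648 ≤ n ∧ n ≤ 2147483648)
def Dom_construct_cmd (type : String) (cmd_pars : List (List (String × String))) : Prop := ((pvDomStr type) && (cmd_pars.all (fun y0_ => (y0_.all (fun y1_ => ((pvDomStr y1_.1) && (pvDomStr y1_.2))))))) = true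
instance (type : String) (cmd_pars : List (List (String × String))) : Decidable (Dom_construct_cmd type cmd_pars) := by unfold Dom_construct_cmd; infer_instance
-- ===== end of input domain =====

-- B fuses A's two scans into one pass that accumulates the dev-file prefix and the flag suffix simultaneously (objective: alternative decomposition, same cost).

-- shared dict primitive: Python's i[k] for a dict rendered as an association list
-- (first match; "" stands for the KeyError case, which Pre_ excludes)
def pvGetD (d : List (String × String)) (k : String) : String :=
  match d.find? (fun p => p.1 == k) with
  | some p => p.2
  | none => ""

-- ===== PORT A =====
-- first loop: scan for the first dev_par_file entry, appending ' '+val and breaking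
def cc_devLoop (cmd : String) : List (List (String × String)) → String
  | [] => cmd
  | d :: rest =>
      if pvGetD d "par" = "dev_par_file" then cmd ++ (" " ++ pvGetD d "val")
      else cc_devLoop cmd rest

def construct_cmd (type : String) (cmd_pars : List (List (String × String))) : String :=
  let cmd_line := cc_devLoop ("./" ++ type) cmd_pars
  cmd_pars.foldl
    (fun c d =>
      if pvGetD d "par" ≠ "dev_par_file" then
        c ++ (" -" ++ pvGetD d "par" ++ " " ++ pvGetD d "val")
      else c)
    cmd_line

-- ===== PORT B =====
-- one fold over (dev, dev_found, rest)
def cc_step (s : String × Bool × String) (d : List (String × String)) : String × Bool × String :=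
  if pvGetD d "par" = "dev_par_file" then
    if s.2.1 = false then (" " ++ pvGetD d "val", true, s.2.2) else s
  else
    (s.1, s.2.1, s.2.2 ++ (" -" ++ pvGetD d "par" ++ " " ++ pvGetD d "val"))

def construct_cmd_alt (type : String) (cmd_pars : List (List (String × String))) : String :=
  let s := cmd_pars.foldl cc_step ("", false, "")
  "./" ++ type ++ s.1 ++ s.2.2

-- ===== PRECONDITION & SPEC =====
-- Pre_ excludes exactly the inputs on which the Python A raises KeyError: some dict
-- misses 'par', or misses 'val' while A reads it (every non-dev_par_file dict, and
-- the first dev_par_file dict if there is one).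
def Pre_construct_cmd (type : String) (cmd_pars : List (List (String × String))) : Prop :=
  (∀ d ∈ cmd_pars, (d.find? (fun p => p.1 == "par")).isSome) ∧
  (∀ d ∈ cmd_pars, pvGetD d "par" ≠ "dev_par_file" → (d.find? (fun p => p.1 == "val")).isSome) ∧
  (∀ d ∈ cmd_pars, cmd_pars.find? (fun x => pvGetD x "par" == "dev_par_file") = some d →
      (d.find? (fun p => p.1 == "val")).isSome)
instance (type : String) (cmd_pars : List (List (String × String))) : Decidable (Pre_construct_cmd type cmd_pars) := by unfold Pre_construct_cmd; infer_instance

def pvWitness_construct_cmd : String × (List (List (String × String))) :=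
  ("simss", [[("par", "dev_par_file"), ("val", "device.txt")], [("par", "Vmax"), ("val", "1.0")]])

def Spec_construct_cmd (type : String) (cmd_pars : List (List (String × String))) (out : String) : Prop := out = construct_cmd_alt type cmd_pars
instance (type : String) (cmd_pars : List (List (String × String))) (out : String) : Decidable (Spec_construct_cmd type cmd_pars out) := by unfold Spec_construct_cmd; infer_instance

-- ===== CLAIM (what is proved, stated in full; the proofs are below) =====
def Claim_equal_construct_cmd : Prop := ∀ (type : String) (cmd_pars : List (List (String × String))), Dom_construct_cmd type cmd_pars → Pre_construct_cmd type cmd_pars → Spec_construct_cmd type cmd_pars (construct_cmd type cmd_pars)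

-- ===== LEMMAS AND PROOFS =====

-- canonical pieces: the dev-file prefix and the flag suffix of a parameter list
def cc_dev : List (List (String × String)) → String
  | [] => ""
  | d :: l => if pvGetD d "par" = "dev_par_file" then " " ++ pvGetD d "val" else cc_dev l

def cc_rest : List (List (String × String)) → String
  | [] => ""
  | d :: l =>
      if pvGetD d "par" = "dev_par_file" then cc_rest l
      else (" -" ++ pvGetD d "par" ++ " " ++ pvGetD d "val") ++ cc_rest l

lemma cc_devLoop_eq (l : List (List (String × String))) (cmd : String) :
    cc_devLoop cmd l = cmd ++ cc_dev l := by
  induction l with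
  | nil => simp [cc_devLoop, cc_dev]
  | cons d l ih =>
      simp only [cc_devLoop, cc_dev]
      split <;> simp [ih]

lemma cc_foldA_eq (l : List (List (String × String))) (cmd : String) :
    l.foldl
      (fun c d =>
        if pvGetD d "par" ≠ "dev_par_file" then
          c ++ (" -" ++ pvGetD d "par" ++ " " ++ pvGetD d "val")
        else c) cmd = cmd ++ cc_rest l := by
  induction l generalizing cmd with
  | nil => simp [cc_rest]
  | cons d l ih =>
      rw [List.foldl_cons, ih]
      simp only [cc_rest]
      by_cases h : pvGetD d "par" = "dev_par_file"
      · simp [h]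
      · simp [h, String.append_assoc]

lemma cc_foldB_true (l : List (List (String × String))) (dev rest : String) :
    l.foldl cc_step (dev, true, rest) = (dev, true, rest ++ cc_rest l) := by
  induction l generalizing rest with
  | nil => simp [cc_rest]
  | cons d l ih =>
      rw [List.foldl_cons]
      by_cases h : pvGetD d "par" = "dev_par_file"
      · rw [show cc_step (dev, true, rest) d = (dev, true, rest) from by simp [cc_step, h]]
        rw [ih]; simp [cc_rest, h]
      · rw [show cc_step (dev, true, rest) d =
              (dev, true, rest ++ (" -" ++ pvGetD d "par" ++ " " ++ pvGetD d "val")) from by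
            simp [cc_step, h]]
        rw [ih]; simp [cc_rest, h, String.append_assoc]

lemma cc_foldB_false (l : List (List (String × String))) (rest : String) :
    l.foldl cc_step ("", false, rest) =
      (cc_dev l, l.any (fun d => pvGetD d "par" = "dev_par_file"), rest ++ cc_rest l) := by
  induction l generalizing rest with
  | nil => simp [cc_rest, show cc_dev [] = "" from rfl]
  | cons d l ih =>
      rw [List.foldl_cons]
      by_cases h : pvGetD d "par" = "dev_par_file"
      · rw [show cc_step ("", false, rest) d = (" " ++ pvGetD d "val", true, rest) from by
            simp [cc_step, h]]
        rw [cc_foldB_true]; simp [cc_dev, cc_rest, h]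
      · rw [show cc_step ("", false, rest) d =
              ("", false, rest ++ (" -" ++ pvGetD d "par" ++ " " ++ pvGetD d "val")) from by
            simp [cc_step, h]]
        rw [ih]; simp [cc_dev, cc_rest, h, String.append_assoc]

-- ===== VERDICT (by name: the statement is the Claim_ definition above) =====
theorem construct_cmd_spec : Claim_equal_construct_cmd := by
  intro type cmd_pars _ _
  show construct_cmd type cmd_pars = construct_cmd_alt type cmd_pars
  unfold construct_cmd construct_cmd_alt
  rw [cc_devLoop_eq, cc_foldA_eq, cc_foldB_false]
  simp [String.append_assoc]
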